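-- pv_equiv track=rewrite | github.com/rpycgo/Algorithm | BOJ/Python/Binary Search/2632.py | get_all_sums
-- ===== SOURCE A (Python) =====
-- def get_all_sums(pizza, n):
--     sums = [0]
--
--     total = sum(pizza)
--     sums.append(total)
--
--     pizza_circled = pizza + pizza
--     for i in range(n):
--         temp = 0
--         for j in range(n-1):
--             temp += pizza_circled[i+j]
--             sums.append(temp)
--
--     return sums
-- ===== SOURCE B (Python) =====
-- def get_all_sums(pizza, n):
--     doubled = pizza + pizza
--     prefix = [0]
--     for x in doubled:
--         prefix.append(prefix[-1] + x)
--     sums = [0, prefix[len(pizza)]]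
--     for i in range(n):
--         for j in range(n - 1):
--             sums.append(prefix[i + j + 1] - prefix[i])
--     return sums
-- ===== Notes on version B (the rewrite author's own statement) =====
-- stated objective: alternative
-- what changed: B replaces A's per-row running accumulator (temp += circled[i+j]) with a prefix-sum table built once over pizza+pizza; each emitted sum is a table difference prefix[i+j+1]-prefix[i], and sums[1] is read from the table as prefix[len(pizza)] instead of re-summing.
import Mathlib
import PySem

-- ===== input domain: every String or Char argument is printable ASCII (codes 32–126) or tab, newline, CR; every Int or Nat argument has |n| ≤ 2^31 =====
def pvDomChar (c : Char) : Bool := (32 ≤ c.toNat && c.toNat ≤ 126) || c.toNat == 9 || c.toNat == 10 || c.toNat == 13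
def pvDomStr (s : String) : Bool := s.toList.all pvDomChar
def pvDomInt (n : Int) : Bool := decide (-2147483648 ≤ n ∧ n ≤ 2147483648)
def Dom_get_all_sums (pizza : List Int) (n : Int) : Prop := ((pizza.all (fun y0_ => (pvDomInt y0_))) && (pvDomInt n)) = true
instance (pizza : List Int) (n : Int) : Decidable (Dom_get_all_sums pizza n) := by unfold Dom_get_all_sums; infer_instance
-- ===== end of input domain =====

-- B builds a prefix-sum table over pizza+pizza once and emits each sum as a table
-- difference prefix[i+j+1]-prefix[i] instead of A's per-row running accumulator.

-- ===== PORT A =====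
def get_all_sums (pizza : List Int) (n : Int) : List Int :=
  let sums : List Int := [0]
  let total := pizza.foldl (· + ·) 0
  let sums := sums ++ [total]
  let circled := pizza ++ pizza
  (PySem.List.pyRange 0 n 1).foldl (fun s i =>
    ((PySem.List.pyRange 0 (n - 1) 1).foldl
      (fun (st : Int × List Int) j =>
        let temp := st.1 + PySem.List.pyGetD circled (i + j) 0
        (temp, st.2 ++ [temp]))
      (0, s)).2) sums

-- ===== PORT B =====
def get_all_sums_alt (pizza : List Int) (n : Int) : List Int :=
  let doubled := pizza ++ pizza
  let pfx := doubled.foldl (fun p x => p ++ [PySem.List.pyGetD p (-1) 0 + x]) ([0] : List Int)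
  let sums : List Int := [0, PySem.List.pyGetD pfx (pizza.length : Int) 0]
  (PySem.List.pyRange 0 n 1).foldl (fun s i =>
    (PySem.List.pyRange 0 (n - 1) 1).foldl
      (fun s j => s ++ [PySem.List.pyGetD pfx (i + j + 1) 0 - PySem.List.pyGetD pfx i 0]) s) sums

-- ===== PRECONDITION & SPEC =====
-- Pre_ excludes exactly the inputs on which A raises IndexError (when n ≥ len(pizza)+2 the
-- index i+j reaches 2·len(pizza)); B raises there too.
def Pre_get_all_sums (pizza : List Int) (n : Int) : Prop := n ≤ (pizza.length : Int) + 1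
instance (pizza : List Int) (n : Int) : Decidable (Pre_get_all_sums pizza n) := by unfold Pre_get_all_sums; infer_instance
def pvWitness_get_all_sums : List Int × Int := ([1, 2, 3], 3)
def Spec_get_all_sums (pizza : List Int) (n : Int) (out : List Int) : Prop := out = get_all_sums_alt pizza n
instance (pizza : List Int) (n : Int) (out : List Int) : Decidable (Spec_get_all_sums pizza n out) := by unfold Spec_get_all_sums; infer_instance

-- ===== CLAIM (what is proved, stated in full; the proofs are below) =====
def Claim_equal_get_all_sums : Prop := ∀ (pizza : List Int) (n : Int), Dom_get_all_sums pizza n → Pre_get_all_sums pizza n → Spec_get_all_sums pizza n (get_all_sums pizza n)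

-- ===== LEMMAS AND PROOFS =====

-- the prefix-building foldl is scanl (+)
theorem pv_build_eq_scanl (xs : List Int) : ∀ (p : List Int) (t : Int),
    xs.foldl (fun p x => p ++ [PySem.List.pyGetD p (-1) 0 + x]) (p ++ [t])
      = p ++ List.scanl (· + ·) t xs := by
  induction xs with
  | nil => intro p t; simp
  | cons x xs ih =>
      intro p t
      simp only [List.foldl_cons, List.scanl_cons]
      rw [PySem.List.pyGetD_neg_one_append_singleton]
      have := ih (p ++ [t]) (t + x)
      simpa using this

theorem pv_scanl_getD (xs : List Int) : ∀ (k : Nat) (t : Int), k ≤ xs.length →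
    (List.scanl (· + ·) t xs).getD k 0 = t + (xs.take k).sum := by
  induction xs with
  | nil =>
      intro k t hk
      have h0 : k = 0 := Nat.le_zero.mp (by simpa using hk)
      subst h0; simp
  | cons x xs ih =>
      intro k t hk
      cases k with
      | zero => simp
      | succ k =>
          rw [List.scanl_cons, List.getD_cons_succ, List.take_succ_cons, List.sum_cons,
            ih k (t + x) (by simpa using hk)]
          ring

-- inner loop: A's running accumulator vs B's prefix-table differences
theorem pv_inner (doubled pfx : List Int)
    (hpfx : ∀ k : Nat, k ≤ doubled.length → pfx.getD k 0 = (doubled.take k).sum)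
    (i : Nat) : ∀ (m : Nat), i + m ≤ doubled.length → ∀ (s : List Int),
    (List.range m).foldl (fun (st : Int × List Int) (j : Nat) =>
        ((st.1 + PySem.List.pyGetD doubled ((i : Int) + (j : Int)) 0),
         st.2 ++ [st.1 + PySem.List.pyGetD doubled ((i : Int) + (j : Int)) 0])) (0, s)
      = ((doubled.take (i + m)).sum - (doubled.take i).sum,
         (List.range m).foldl (fun s (j : Nat) =>
             s ++ [PySem.List.pyGetD pfx ((i : Int) + (j : Int) + 1) 0
                    - PySem.List.pyGetD pfx (i : Int) 0]) s) := by
  intro m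
  induction m with
  | zero => intro _ s; simp
  | succ m ih =>
      intro hm s
      have hm' : i + m ≤ doubled.length := by omega
      have hlt : i + m < doubled.length := by omega
      rw [List.range_succ, List.foldl_append, List.foldl_append, ih hm' s]
      have hd : PySem.List.pyGetD doubled ((i : Int) + (m : Int)) 0 = doubled[i + m] := by
        have : ((i : Int) + (m : Int)) = ((i + m : Nat) : Int) := by push_cast; ring
        rw [this, PySem.List.pyGetD_natCast, List.getD_eq_getElem _ _ hlt]
      have hp1 : PySem.List.pyGetD pfx ((i : Int) + (m : Int) + 1) 0
          = (doubled.take (i + m + 1)).sum := by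
        have : ((i : Int) + (m : Int) + 1) = ((i + m + 1 : Nat) : Int) := by push_cast; ring
        rw [this, PySem.List.pyGetD_natCast, hpfx _ (by omega)]
      have hp0 : PySem.List.pyGetD pfx (i : Int) 0 = (doubled.take i).sum := by
        rw [PySem.List.pyGetD_natCast, hpfx _ (by omega)]
      simp only [List.foldl_cons, List.foldl_nil, hd, hp1, hp0, Nat.add_succ,
        List.sum_take_succ doubled (i + m) hlt, Prod.mk.injEq]
      refine ⟨by ring, ?_⟩
      congr 1
      simp only [List.cons.injEq, and_true]
      ring

-- ===== VERDICT (by name: the statement is the Claim_ definition above) =====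
theorem get_all_sums_spec : Claim_equal_get_all_sums := by
  intro pizza n _ hpre
  unfold Pre_get_all_sums at hpre
  unfold Spec_get_all_sums get_all_sums get_all_sums_alt
  simp only []
  set doubled := pizza ++ pizza with hdbl
  have hbuild : doubled.foldl (fun p x => p ++ [PySem.List.pyGetD p (-1) 0 + x]) ([0] : List Int)
      = List.scanl (· + ·) 0 doubled := by
    have := pv_build_eq_scanl doubled [] 0
    simpa using this
  set pfx := doubled.foldl (fun p x => p ++ [PySem.List.pyGetD p (-1) 0 + x]) ([0] : List Int) with hpfxdef
  have hpfx : ∀ k : Nat, k ≤ doubled.length → pfx.getD k 0 = (doubled.take k).sum := by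
    intro k hk
    rw [hbuild, pv_scanl_getD doubled k 0 hk]
    ring
  have hlen : doubled.length = pizza.length + pizza.length := by simp [hdbl]
  -- head: total = prefix[len(pizza)]
  have hhead : pizza.foldl (· + ·) 0 = PySem.List.pyGetD pfx (pizza.length : Int) 0 := by
    rw [PySem.List.pyGetD_natCast, hpfx pizza.length (by omega), hdbl, List.take_left]
    exact List.sum_eq_foldl.symm
  rw [hhead]
  -- ranges as Nat ranges
  rw [PySem.List.pyRange_one 0 n, PySem.List.pyRange_one 0 (n - 1),
    List.foldl_map, List.foldl_map]
  simp only [Int.zero_add, Int.sub_zero]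
  apply PySem.List.foldl_congr_mem
  intro s ki hki
  have hkiN : ki < (n : Int).toNat := List.mem_range.mp hki
  have hkilen : ki ≤ pizza.length := by omega
  have hM : (n - 1).toNat ≤ pizza.length := by omega
  rw [List.foldl_map, List.foldl_map]
  have := pv_inner doubled pfx hpfx ki (n - 1).toNat (by omega) s
  rw [this]
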